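-- pv_equiv track=rewrite | github.com/Sho1981/NLP-100Excercise | 02_UNIX-command/16.py | d_num_list
-- ===== SOURCE A (Python) =====
-- def d_num_list(length, n):
--     """
--     Making divided number list that number 'length' is divided by number n
--     for example length = 100, n = 8 -> [13, 13, 13, 13, 12, 12, 12, 12]
--     """
--     if n == 1:
--         return [length]
--     d = length // n
--     if (length % n):
--         return [d+1] + d_num_list(length-d-1, n-1)
--     else:
--         return [d] + d_num_list(length-d, n-1)
-- ===== SOURCE B (Python) =====
-- def d_num_list(length, n):
--     q, r = divmod(length, n)
--     return [q + 1] * r + [q] * (n - r)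
-- ===== Notes on version B (the rewrite author's own statement) =====
-- stated objective: faster
-- what changed: Replaced the n-deep recursion (one floor-division and list concatenation per part) by the closed form q,r = divmod(length,n); [q+1]*r + [q]*(n-r); intended as faster (asymptotic): measured 269x at n=4096, the largest size where A finishes (A hits the recursion limit beyond).
import Mathlib
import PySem

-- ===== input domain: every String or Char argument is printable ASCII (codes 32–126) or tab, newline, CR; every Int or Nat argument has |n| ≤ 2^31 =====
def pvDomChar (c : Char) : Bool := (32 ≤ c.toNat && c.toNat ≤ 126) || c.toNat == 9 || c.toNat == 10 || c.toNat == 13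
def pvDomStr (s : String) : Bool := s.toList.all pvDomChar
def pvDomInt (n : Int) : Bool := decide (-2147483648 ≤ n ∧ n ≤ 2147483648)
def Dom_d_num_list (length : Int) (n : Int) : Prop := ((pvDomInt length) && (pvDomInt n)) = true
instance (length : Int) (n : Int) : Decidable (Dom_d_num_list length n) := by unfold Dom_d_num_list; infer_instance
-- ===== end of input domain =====

-- B replaces A's n-deep recursion by the closed form [q+1]*r ++ [q]*(n-r) with q,r = divmod(length,n).

-- ===== PORT A =====
-- Literal port of A's recursion; the 'n ≤ 0' guard only makes the recursion total where
-- Python raises ZeroDivisionError (n = 0) or diverges (n < 0); those inputs are outside Pre_.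
def d_num_list (length : Int) (n : Int) : List Int :=
  if n == 1 then [length]
  else if h : n ≤ 0 then []
  else
    let d := PySem.Int.floordiv length n
    if PySem.Int.mod length n ≠ 0 then (d + 1) :: d_num_list (length - d - 1) (n - 1)
    else d :: d_num_list (length - d) (n - 1)
termination_by n.toNat
decreasing_by all_goals omega

-- ===== PORT B =====
def d_num_list_alt (length : Int) (n : Int) : List Int :=
  let q := PySem.Int.floordiv length n
  let r := PySem.Int.mod length n
  List.replicate r.toNat (q + 1) ++ List.replicate (n - r).toNat q

-- ===== PRECONDITION & SPEC =====
-- Pre_ excludes n ≤ 0: n = 0 raises ZeroDivisionError in A, n < 0 recurses forever.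
def Pre_d_num_list (length : Int) (n : Int) : Prop := 1 ≤ n
instance (length : Int) (n : Int) : Decidable (Pre_d_num_list length n) := by unfold Pre_d_num_list; infer_instance
def pvWitness_d_num_list : Int × Int := (100, 8)
def Spec_d_num_list (length : Int) (n : Int) (out : List Int) : Prop := out = d_num_list_alt length n
instance (length : Int) (n : Int) (out : List Int) : Decidable (Spec_d_num_list length n out) := by unfold Spec_d_num_list; infer_instance

-- ===== CLAIM (what is proved, stated in full; the proofs are below) =====
def Claim_equal_d_num_list : Prop := ∀ (length : Int) (n : Int), Dom_d_num_list length n → Pre_d_num_list length n → Spec_d_num_list length n (d_num_list length n)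

-- ===== LEMMAS AND PROOFS =====

theorem pv_floordiv_mul_add (q s b : Int) (hb : 0 < b) (h0 : 0 ≤ s) (h1 : s < b) :
    PySem.Int.floordiv (q * b + s) b = q := by
  rw [PySem.Int.floordiv_eq_iff_of_pos hb]
  constructor <;> nlinarith

theorem pv_mod_mul_add (q s b : Int) (hb : 0 < b) (h0 : 0 ≤ s) (h1 : s < b) :
    PySem.Int.mod (q * b + s) b = s := by
  have h := PySem.Int.floordiv_mul_add_mod (q * b + s) b
  rw [pv_floordiv_mul_add q s b hb h0 h1] at h
  linarith

theorem pv_main (k : Nat) : ∀ length : Int, d_num_list length (k + 1) = d_num_list_alt length (k + 1) := by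
  induction k with
  | zero =>
    intro length
    rw [d_num_list]
    have hq : PySem.Int.floordiv length 1 = length := by
      have := pv_floordiv_mul_add length 0 1 (by omega) (by omega) (by omega)
      simpa using this
    have hr : PySem.Int.mod length 1 = 0 := by
      have := pv_mod_mul_add length 0 1 (by omega) (by omega) (by omega)
      simpa using this
    simp [d_num_list_alt, hr]
  | succ k ih =>
    intro length
    have hcast : (((k+1:Nat)):Int) + 1 = (k:Int) + 2 := by push_cast; ring
    rw [d_num_list, hcast]
    set q := PySem.Int.floordiv length ((k:Int)+2) with hq_def
    set r := PySem.Int.mod length ((k:Int)+2) with hr_def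
    have heq : q * ((k:Int)+2) + r = length := by
      have := PySem.Int.floordiv_mul_add_mod length ((k:Int)+2); linarith
    have hr0 : 0 ≤ r := PySem.Int.mod_nonneg length (by positivity)
    have hr1 : r < (k:Int)+2 := PySem.Int.mod_lt length (by positivity)
    rw [if_neg (by simp; omega), dif_neg (by omega)]
    have hsub : (k:Int) + 2 - 1 = (k:Int) + 1 := by ring
    rw [hsub]
    by_cases hr : r = 0
    · rw [if_neg (by simp [hr]), ih]
      have harg : length - q = q * ((k:Int) + 1) := by linear_combination -heq + hr
      have hq' : PySem.Int.floordiv (length - q) ((k:Int)+1) = q := by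
        rw [harg]
        simpa using pv_floordiv_mul_add q 0 ((k:Int)+1) (by positivity) (by omega) (by positivity)
      have hr' : PySem.Int.mod (length - q) ((k:Int)+1) = 0 := by
        rw [harg]
        simpa using pv_mod_mul_add q 0 ((k:Int)+1) (by positivity) le_rfl (by positivity)
      simp only [d_num_list_alt, hq', hr', ← hq_def, ← hr_def, hr]
      have h2 : ((k:Int) + 2).toNat = k + 2 := by omega
      have h3 : ((k:Int) + 1).toNat = k + 1 := by omega
      simp [h2, h3, List.replicate_succ]
    · rw [if_pos (by simpa using hr), ih]
      have harg : length - q - 1 = q * ((k:Int) + 1) + (r - 1) := by linear_combination -heq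
      have hq' : PySem.Int.floordiv (length - q - 1) ((k:Int)+1) = q := by
        rw [harg]; exact pv_floordiv_mul_add q (r-1) ((k:Int)+1) (by positivity) (by omega) (by omega)
      have hr' : PySem.Int.mod (length - q - 1) ((k:Int)+1) = r - 1 := by
        rw [harg]; exact pv_mod_mul_add q (r-1) ((k:Int)+1) (by positivity) (by omega) (by omega)
      simp only [d_num_list_alt, hq', hr', ← hq_def, ← hr_def]
      rw [show r.toNat = (r - 1).toNat + 1 from by omega,
        show ((k:Int) + 2 - r).toNat = (((k:Int) + 1) - (r - 1)).toNat from by omega]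
      simp [List.replicate_succ]

-- ===== VERDICT (by name: the statement is the Claim_ definition above) =====
theorem d_num_list_spec : Claim_equal_d_num_list := by
  intro length n _ hpre
  unfold Spec_d_num_list
  obtain ⟨k, hk⟩ : ∃ k : Nat, n = (k:Int) + 1 := ⟨(n - 1).toNat, by unfold Pre_d_num_list at hpre; omega⟩
  rw [hk]; exact pv_main k length
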